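-- pv_equiv track=rewrite | github.com/cym9812/automatic-computing-machine | 早期练习/检测代码合法性.py | is_legitmate_code
-- ===== SOURCE A (Python) =====
-- def is_legitmate_code(string):
--     code_letters = ["A", "B", "Z", "T", "X"]
--     min_for_each_letter = [2, 2, 1, 0, 4]
--     max_for_each_letter = [8, 9, 6, 7, 5]
--     string = string.replace(" ", "")
--     count = 0
--     if string != "" and len(string) > 1:
--         if string[0] in code_letters:
--             if string[1:].isdigit():
--                 if string[0] == "A":
--                     for number in string[1:]:
--                         if min_for_each_letter[0] <= int(number) <= max_for_each_letter[0]: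
--                             count = count + 1
--                     if count == len(string) - 1:
--                         return "True"
--                     else:
--                         return "False"
--                 elif string[0] == "B":
--                     for number in string[1:]:
--                         if min_for_each_letter[1] <= int(number) <= max_for_each_letter[1]:
--                             count = count + 1
--                     if count == len(string) - 1:
--                         return "True"
--                     else:
--                         return "False"
--                 elif string[0] == "Z":
--                     for number in string[1:]:
--                         if min_for_each_letter[2] <= int(number) <= max_for_each_letter[2]:
--                             count = count + 1
--                     if count == len(string) - 1:
--                         return "True"
--                     else:
--                         return "False"
--                 elif string[0] == "T":
--                     for number in string[1:]:
--                         if min_for_each_letter[3] <= int(number) <= max_for_each_letter[3]: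
--                             count = count + 1
--                     if count == len(string) - 1:
--                         return "True"
--                     else:
--                         return "False"
--                 elif string[0] == "X":
--                     for number in string[1:]:
--                         if min_for_each_letter[4] <= int(number) <= max_for_each_letter[4]:
--                             count = count + 1
--                     if count == len(string) - 1:
--                         return "True"
--                     else:
--                         return "False"
--             else:
--                 return "False"
--         else:
--             return "False"
--     else:
--         return "False"
-- ===== SOURCE B (Python) =====
-- def is_legitmate_code(string):
--     # Single streaming pass over the raw string (state machine):
--     # skip spaces on the fly, latch the bound pair at the first real char,
--     # then validate each following char immediately with early exit.
--     bounds = None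
--     seen_digit = False
--     for ch in string:
--         if ch == " ":
--             continue
--         if bounds is None:
--             if ch == "A":
--                 bounds = (2, 8)
--             elif ch == "B":
--                 bounds = (2, 9)
--             elif ch == "Z":
--                 bounds = (1, 6)
--             elif ch == "T":
--                 bounds = (0, 7)
--             elif ch == "X":
--                 bounds = (4, 5)
--             else:
--                 return "False"
--         else:
--             if not (ch.isdigit() and bounds[0] <= int(ch) <= bounds[1]):
--                 return "False"
--             seen_digit = True
--     return "True" if bounds is not None and seen_digit else "False"
-- ===== Notes on version B (the rewrite author's own statement) =====
-- stated objective: alternative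
-- what changed: Replaces A's staged pipeline (replace spaces, slice, whole-tail isdigit test, five duplicated per-letter counting loops, count==len comparison) by a single streaming state-machine pass over the raw string that skips spaces on the fly, latches the bound pair at the first real character, and validates each subsequent character immediately with early exit.
import Mathlib
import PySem

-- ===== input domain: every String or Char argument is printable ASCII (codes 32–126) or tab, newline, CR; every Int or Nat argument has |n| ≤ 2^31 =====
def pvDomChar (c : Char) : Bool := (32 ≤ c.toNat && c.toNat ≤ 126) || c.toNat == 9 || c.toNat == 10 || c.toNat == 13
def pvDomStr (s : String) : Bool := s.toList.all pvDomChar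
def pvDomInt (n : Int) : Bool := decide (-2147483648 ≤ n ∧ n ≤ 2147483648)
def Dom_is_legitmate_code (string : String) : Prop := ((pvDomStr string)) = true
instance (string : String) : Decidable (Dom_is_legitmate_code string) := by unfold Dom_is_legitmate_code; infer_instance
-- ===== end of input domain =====

-- B replaces A's staged pipeline (space-replace, slice, whole-tail isdigit, five per-letter
-- counting loops) by one streaming state-machine pass with early exit (objective: alternative).

-- ===== PORT A =====
def is_legitmate_code (string : String) : String :=
  let code_letters : List Char := ['A', 'B', 'Z', 'T', 'X']
  let mins : List Int := [2, 2, 1, 0, 4]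
  let maxs : List Int := [8, 9, 6, 7, 5]
  let s : List Char := PySem.Chars.replace string.toList [' '] []
  let count : Int := 0
  if s ≠ [] ∧ s.length > 1 then
    if PySem.List.pyGetD s 0 ' ' ∈ code_letters then
      if PySem.Chars.strIsdigit (PySem.List.slice s (some 1) none) then
        if PySem.List.pyGetD s 0 ' ' = 'A' then
          let count := (PySem.List.slice s (some 1) none).foldl
            (fun cnt ch =>
              if PySem.List.pyGetD mins 0 0 ≤ (PySem.Int.ofChars? [ch]).getD 0 ∧
                 (PySem.Int.ofChars? [ch]).getD 0 ≤ PySem.List.pyGetD maxs 0 0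
              then cnt + 1 else cnt) count
          if count = (s.length : Int) - 1 then "True" else "False"
        else if PySem.List.pyGetD s 0 ' ' = 'B' then
          let count := (PySem.List.slice s (some 1) none).foldl
            (fun cnt ch =>
              if PySem.List.pyGetD mins 1 0 ≤ (PySem.Int.ofChars? [ch]).getD 0 ∧
                 (PySem.Int.ofChars? [ch]).getD 0 ≤ PySem.List.pyGetD maxs 1 0
              then cnt + 1 else cnt) count
          if count = (s.length : Int) - 1 then "True" else "False"
        else if PySem.List.pyGetD s 0 ' ' = 'Z' then
          let count := (PySem.List.slice s (some 1) none).foldl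
            (fun cnt ch =>
              if PySem.List.pyGetD mins 2 0 ≤ (PySem.Int.ofChars? [ch]).getD 0 ∧
                 (PySem.Int.ofChars? [ch]).getD 0 ≤ PySem.List.pyGetD maxs 2 0
              then cnt + 1 else cnt) count
          if count = (s.length : Int) - 1 then "True" else "False"
        else if PySem.List.pyGetD s 0 ' ' = 'T' then
          let count := (PySem.List.slice s (some 1) none).foldl
            (fun cnt ch =>
              if PySem.List.pyGetD mins 3 0 ≤ (PySem.Int.ofChars? [ch]).getD 0 ∧
                 (PySem.Int.ofChars? [ch]).getD 0 ≤ PySem.List.pyGetD maxs 3 0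
              then cnt + 1 else cnt) count
          if count = (s.length : Int) - 1 then "True" else "False"
        else if PySem.List.pyGetD s 0 ' ' = 'X' then
          let count := (PySem.List.slice s (some 1) none).foldl
            (fun cnt ch =>
              if PySem.List.pyGetD mins 4 0 ≤ (PySem.Int.ofChars? [ch]).getD 0 ∧
                 (PySem.Int.ofChars? [ch]).getD 0 ≤ PySem.List.pyGetD maxs 4 0
              then cnt + 1 else cnt) count
          if count = (s.length : Int) - 1 then "True" else "False"
        else "False" -- unreachable: the membership guard above admits exactly the five letters
      else "False"
    else "False"
  else "False"

-- ===== PORT B =====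
-- the elif chain assigning `bounds` in Source B
def pvAltTable (ch : Char) : Option (Int × Int) :=
  if ch = 'A' then some (2, 8)
  else if ch = 'B' then some (2, 9)
  else if ch = 'Z' then some (1, 6)
  else if ch = 'T' then some (0, 7)
  else if ch = 'X' then some (4, 5)
  else none

-- Source B's for-loop with early return, as structural recursion over the characters;
-- the final `return "True" if … else "False"` is the [] case
def pvAltLoop : List Char → Option (Int × Int) → Bool → String
  | [], bounds, seen_digit => if bounds.isSome ∧ seen_digit then "True" else "False"
  | ch :: rest, bounds, seen_digit =>
    if ch = ' ' then pvAltLoop rest bounds seen_digit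
    else
      match bounds with
      | none =>
        match pvAltTable ch with
        | some b => pvAltLoop rest (some b) seen_digit
        | none => "False"
      | some (lo, hi) =>
        if PySem.Chars.strIsdigit [ch] ∧ lo ≤ (PySem.Int.ofChars? [ch]).getD 0 ∧
           (PySem.Int.ofChars? [ch]).getD 0 ≤ hi
        then pvAltLoop rest bounds true
        else "False"

def is_legitmate_code_alt (string : String) : String :=
  pvAltLoop string.toList none false

-- ===== PRECONDITION & SPEC =====
def Spec_is_legitmate_code (string : String) (out : String) : Prop := out = is_legitmate_code_alt string
instance (string : String) (out : String) : Decidable (Spec_is_legitmate_code string out) := by unfold Spec_is_legitmate_code; infer_instance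

-- ===== CLAIM (what is proved, stated in full; the proofs are below) =====
def Claim_equal_is_legitmate_code : Prop := ∀ (string : String), Dom_is_legitmate_code string → Spec_is_legitmate_code string (is_legitmate_code string)

-- ===== LEMMAS AND PROOFS =====

-- the per-character test B applies once bounds are latched
def pvOk (lo hi : Int) (c : Char) : Bool :=
  PySem.Chars.strIsdigit [c] &&
    (decide (lo ≤ (PySem.Int.ofChars? [c]).getD 0) && decide ((PySem.Int.ofChars? [c]).getD 0 ≤ hi))

-- replacing " " by "" is filtering spaces out
lemma replace_go_space (fuel : Nat) : ∀ (l acc : List Char), l.length ≤ fuel →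
    PySem.Chars.replace.go [' '] [] fuel l acc = acc.reverse ++ l.filter (fun c => !(c == ' ')) := by
  induction fuel with
  | zero => intro l acc h; simp at h; simp [h, PySem.Chars.replace.go]
  | succ n ih =>
    intro l acc h
    cases l with
    | nil => simp [PySem.Chars.replace.go]
    | cons c t =>
      simp only [PySem.Chars.replace.go]
      by_cases hc : c = ' '
      · subst hc
        rw [if_pos (by simp [List.isPrefixOf])]
        have hdrop : List.drop ([' '] : List Char).length (' ' :: t) = t := rfl
        rw [hdrop]
        simp only [List.length_cons] at h
        rw [ih _ _ (by omega)]
        simp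
      · rw [if_neg (by simp [List.isPrefixOf]; exact fun hh => hc hh.symm)]
        simp only [List.length_cons] at h
        rw [ih _ _ (by omega)]
        simp [hc]

lemma replace_space (l : List Char) :
    PySem.Chars.replace l [' '] [] = l.filter (fun c => !(c == ' ')) := by
  rw [PySem.Chars.replace]
  rw [if_neg (by simp)]
  simpa using replace_go_space l.length l [] le_rfl

-- B's loop ignores spaces: it computes the same answer on the space-filtered list
lemma altLoop_filter (l : List Char) : ∀ (b : Option (Int × Int)) (s : Bool),
    pvAltLoop l b s = pvAltLoop (l.filter (fun c => !(c == ' '))) b s := by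
  induction l with
  | nil => intro b s; simp
  | cons c t ih =>
    intro b s
    by_cases hc : c = ' '
    · subst hc; simp [pvAltLoop, ih]
    · simp only [List.filter_cons]
      rw [if_pos (by simp [hc])]
      cases b with
      | none =>
        cases hT : pvAltTable c with
        | some p => simp [pvAltLoop, hc, hT, ih]
        | none => simp [pvAltLoop, hc, hT]
      | some p =>
        obtain ⟨lo, hi⟩ := p
        by_cases hok : PySem.Chars.strIsdigit [c] = true ∧
            lo ≤ (PySem.Int.ofChars? [c]).getD 0 ∧ (PySem.Int.ofChars? [c]).getD 0 ≤ hi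
        · simp [pvAltLoop, hc, hok, ih]
        · simp [pvAltLoop, hc, hok]

lemma strIsdigit_singleton (c : Char) :
    PySem.Chars.strIsdigit [c] = PySem.Chars.isdigit c := by
  simp [PySem.Chars.strIsdigit]

-- once bounds are latched and a digit was seen, B's loop is an `all` check
lemma altLoop_some_true (lo hi : Int) : ∀ (t : List Char), (∀ x ∈ t, x ≠ ' ') →
    pvAltLoop t (some (lo, hi)) true = if t.all (pvOk lo hi) then "True" else "False" := by
  intro t
  induction t with
  | nil => intro _; simp [pvAltLoop]
  | cons c t ih =>
    intro h
    have hc : c ≠ ' ' := h c (by simp)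
    simp only [pvAltLoop, if_neg hc]
    by_cases hok : PySem.Chars.strIsdigit [c] = true ∧
        lo ≤ (PySem.Int.ofChars? [c]).getD 0 ∧ (PySem.Int.ofChars? [c]).getD 0 ≤ hi
    · rw [if_pos hok, ih (fun x hx => h x (by simp [hx]))]
      have hq : pvOk lo hi c = true := by simp [pvOk, hok.1, hok.2.1, hok.2.2]
      simp [hq]
    · rw [if_neg hok]
      have hq : pvOk lo hi c = false := by
        cases h3 : pvOk lo hi c with
        | false => rfl
        | true =>
          simp only [pvOk, Bool.and_eq_true, decide_eq_true_eq] at h3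
          exact absurd ⟨h3.1, h3.2.1, h3.2.2⟩ hok
      simp [hq]

-- one of A's letter branches (whole-tail isdigit test, counting loop, count = len comparison)
-- equals B's loop after the letter latched (lo, hi)
lemma branch_eq_alt (lo hi : Int) (d : Char) (t : List Char)
    (hd : d ≠ ' ') (ht : ∀ x ∈ t, x ≠ ' ') :
    (if PySem.Chars.strIsdigit (d :: t) = true then
       (if (List.foldl (fun cnt ch =>
              if lo ≤ (PySem.Int.ofChars? [ch]).getD 0 ∧ (PySem.Int.ofChars? [ch]).getD 0 ≤ hi
              then cnt + 1 else cnt) (0 : Int) (d :: t) = (((d :: t).length : Nat) : Int))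
        then "True" else "False")
     else "False")
    = pvAltLoop (d :: t) (some (lo, hi)) false := by
  have hcount := PySem.List.foldl_count_if
    (fun ch => decide (lo ≤ (PySem.Int.ofChars? [ch]).getD 0 ∧ (PySem.Int.ofChars? [ch]).getD 0 ≤ hi))
    (d :: t) 0
  simp only [decide_eq_true_eq] at hcount
  rw [hcount]
  simp only [pvAltLoop, if_neg hd]
  set p := fun ch => decide (lo ≤ (PySem.Int.ofChars? [ch]).getD 0 ∧ (PySem.Int.ofChars? [ch]).getD 0 ≤ hi) with hp
  by_cases hok2 : PySem.Chars.strIsdigit [d] = true ∧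
      lo ≤ (PySem.Int.ofChars? [d]).getD 0 ∧ (PySem.Int.ofChars? [d]).getD 0 ≤ hi
  · rw [if_pos hok2, altLoop_some_true lo hi t ht]
    have hpd : pvOk lo hi d = true := by simp [pvOk, hok2.1, hok2.2.1, hok2.2.2]
    by_cases hta : t.all (pvOk lo hi) = true
    · -- everything passes: A's isdigit holds and the count equals the length
      have hall : ∀ x ∈ d :: t, pvOk lo hi x = true := by
        intro x hx
        rcases List.mem_cons.mp hx with rfl | hx
        · exact hpd
        · exact List.all_eq_true.mp hta x hx
      have hdig : PySem.Chars.strIsdigit (d :: t) = true := by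
        simp only [PySem.Chars.strIsdigit, List.all_eq_true, List.isEmpty_cons,
          Bool.not_false, Bool.true_and]
        intro x hx
        have := hall x hx
        simp only [pvOk, Bool.and_eq_true] at this
        rw [strIsdigit_singleton] at this
        exact this.1
      have hcnt : List.countP p (d :: t) = (d :: t).length := by
        rw [List.countP_eq_length]
        intro x hx
        have := hall x hx
        simp only [pvOk, Bool.and_eq_true, decide_eq_true_eq] at this
        simp [hp, this.2.1, this.2.2]
      conv_lhs => rw [if_pos hdig, hcnt]
      simp [hta]
    · -- some char of t fails B's per-char check: both sides are "False"
      have hta' : t.all (pvOk lo hi) = false := by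
        cases hq : t.all (pvOk lo hi) with
        | false => rfl
        | true => exact absurd hq hta
      conv_rhs => rw [hta']
      obtain ⟨x, hx, hxf⟩ : ∃ x ∈ t, pvOk lo hi x = false := by
        have h1 : ¬ (∀ x ∈ t, pvOk lo hi x = true) := by
          intro hforall
          exact hta (List.all_eq_true.mpr hforall)
        simp only [not_forall] at h1
        obtain ⟨x, hx, hxx⟩ := h1
        exact ⟨x, hx, by simpa using hxx⟩
      by_cases hdig : PySem.Chars.strIsdigit (d :: t) = true
      · conv_lhs => rw [if_pos hdig]
        have hxd : PySem.Chars.isdigit x = true := by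
          simp only [PySem.Chars.strIsdigit, List.all_eq_true, List.isEmpty_cons,
            Bool.not_false, Bool.true_and] at hdig
          exact hdig x (by simp [hx])
        have hxr : ¬ (lo ≤ (PySem.Int.ofChars? [x]).getD 0 ∧ (PySem.Int.ofChars? [x]).getD 0 ≤ hi) := by
          intro hr
          have : pvOk lo hi x = true := by
            simp [pvOk, strIsdigit_singleton, hxd, hr.1, hr.2]
          simp [this] at hxf
        have hne : List.countP p (d :: t) ≠ (d :: t).length := by
          intro he
          exact hxr (by simpa [hp] using List.countP_eq_length.mp he x (by simp [hx]))
        conv_lhs => rw [if_neg (show ¬ ((0 : Int) + (List.countP p (d :: t) : Int) = (((d :: t).length : Nat) : Int)) by push_cast; omega)]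
        simp
      · conv_lhs => rw [if_neg hdig]
        simp
  · rw [if_neg hok2]
    by_cases hdig2 : PySem.Chars.strIsdigit (d :: t) = true
    · conv_lhs => rw [if_pos hdig2]
      have hdd : PySem.Chars.isdigit d = true := by
        simp only [PySem.Chars.strIsdigit, List.all_eq_true, List.isEmpty_cons,
          Bool.not_false, Bool.true_and] at hdig2
        exact hdig2 d (by simp)
      have hdr : ¬ (lo ≤ (PySem.Int.ofChars? [d]).getD 0 ∧ (PySem.Int.ofChars? [d]).getD 0 ≤ hi) := by
        intro hr
        exact hok2 ⟨by simp [strIsdigit_singleton, hdd], hr.1, hr.2⟩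
      have hne : List.countP p (d :: t) ≠ (d :: t).length := by
        intro he
        exact hdr (by simpa [hp] using List.countP_eq_length.mp he d (by simp))
      conv_lhs => rw [if_neg (show ¬ ((0 : Int) + (List.countP p (d :: t) : Int) = (((d :: t).length : Nat) : Int)) by push_cast; omega)]
    · conv_lhs => rw [if_neg hdig2]

-- ===== VERDICT (by name: the statement is the Claim_ definition above) =====
theorem is_legitmate_code_spec : Claim_equal_is_legitmate_code := by
  intro string _
  unfold Spec_is_legitmate_code is_legitmate_code is_legitmate_code_alt
  rw [replace_space, altLoop_filter]
  have hns : ∀ x ∈ string.toList.filter (fun c => !(c == ' ')), x ≠ ' ' := by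
    intro x hx
    have := List.of_mem_filter hx
    simpa using this
  generalize hgen : string.toList.filter (fun c => !(c == ' ')) = s at hns ⊢
  clear hgen
  match s, hns with
  | [], _ => simp [pvAltLoop]
  | [c], hns =>
    have hc : c ≠ ' ' := hns c (by simp)
    cases hT : pvAltTable c with
    | some b => simp [pvAltLoop, hT, hc]
    | none => simp [pvAltLoop, hT, hc]
  | c :: d :: t, hns =>
    have hc : c ≠ ' ' := hns c (by simp)
    have hd : d ≠ ' ' := hns d (by simp)
    have ht : ∀ x ∈ t, x ≠ ' ' := fun x hx => hns x (by simp [hx])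
    have hne : (c :: d :: t) ≠ [] ∧ (c :: d :: t).length > 1 := by simp
    have hget : PySem.List.pyGetD (c :: d :: t) 0 ' ' = c := by
      simp [PySem.List.pyGetD_zero_cons]
    have hslice : PySem.List.slice (c :: d :: t) (some 1) none = d :: t := by
      have h := PySem.List.slice_from (xs := c :: d :: t) (a := 1) (by omega)
      simpa using h
    have hlen : ((c :: d :: t).length : Int) - 1 = (((d :: t).length : Nat) : Int) := by
      push_cast [List.length_cons]; ring
    rw [if_pos hne]
    rw [hget, hslice]
    by_cases hcm : c ∈ (['A', 'B', 'Z', 'T', 'X'] : List Char)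
    · simp only [List.mem_cons, List.not_mem_nil, or_false] at hcm
      rcases hcm with rfl | rfl | rfl | rfl | rfl
      ·
        rw [if_pos (by simp)]
        rw [if_pos (show ('A' : Char) = 'A' by rfl)]
        simp only [PySem.List.pyGetD_ofNat', hlen]
        rw [show pvAltLoop ('A' :: d :: t) none false = pvAltLoop (d :: t) (some (2, 8)) false
            from by simp [pvAltLoop, pvAltTable]]
        exact branch_eq_alt 2 8 d t hd ht
      ·
        rw [if_pos (by simp)]
        rw [if_neg (show ¬ ('B' : Char) = 'A' by decide)]
        rw [if_pos (show ('B' : Char) = 'B' by rfl)]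
        simp only [PySem.List.pyGetD_ofNat', hlen]
        rw [show pvAltLoop ('B' :: d :: t) none false = pvAltLoop (d :: t) (some (2, 9)) false
            from by simp [pvAltLoop, pvAltTable]]
        exact branch_eq_alt 2 9 d t hd ht
      ·
        rw [if_pos (by simp)]
        rw [if_neg (show ¬ ('Z' : Char) = 'A' by decide)]
        rw [if_neg (show ¬ ('Z' : Char) = 'B' by decide)]
        rw [if_pos (show ('Z' : Char) = 'Z' by rfl)]
        simp only [PySem.List.pyGetD_ofNat', hlen]
        rw [show pvAltLoop ('Z' :: d :: t) none false = pvAltLoop (d :: t) (some (1, 6)) false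
            from by simp [pvAltLoop, pvAltTable]]
        exact branch_eq_alt 1 6 d t hd ht
      ·
        rw [if_pos (by simp)]
        rw [if_neg (show ¬ ('T' : Char) = 'A' by decide)]
        rw [if_neg (show ¬ ('T' : Char) = 'B' by decide)]
        rw [if_neg (show ¬ ('T' : Char) = 'Z' by decide)]
        rw [if_pos (show ('T' : Char) = 'T' by rfl)]
        simp only [PySem.List.pyGetD_ofNat', hlen]
        rw [show pvAltLoop ('T' :: d :: t) none false = pvAltLoop (d :: t) (some (0, 7)) false
            from by simp [pvAltLoop, pvAltTable]]
        exact branch_eq_alt 0 7 d t hd ht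
      ·
        rw [if_pos (by simp)]
        rw [if_neg (show ¬ ('X' : Char) = 'A' by decide)]
        rw [if_neg (show ¬ ('X' : Char) = 'B' by decide)]
        rw [if_neg (show ¬ ('X' : Char) = 'Z' by decide)]
        rw [if_neg (show ¬ ('X' : Char) = 'T' by decide)]
        rw [if_pos (show ('X' : Char) = 'X' by rfl)]
        simp only [PySem.List.pyGetD_ofNat', hlen]
        rw [show pvAltLoop ('X' :: d :: t) none false = pvAltLoop (d :: t) (some (4, 5)) false
            from by simp [pvAltLoop, pvAltTable]]
        exact branch_eq_alt 4 5 d t hd ht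
    · have hT : pvAltTable c = none := by
        simp only [List.mem_cons, List.not_mem_nil, or_false, not_or] at hcm
        simp [pvAltTable, hcm.1, hcm.2.1, hcm.2.2.1, hcm.2.2.2.1, hcm.2.2.2.2]
      rw [if_neg hcm]
      simp [pvAltLoop, hc, hT]
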